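-- pv_equiv track=rewrite | github.com/MarwinMarw/RINEX-satellite-position | RSP/parse_rinex.py | _fix_negative_num
-- ===== SOURCE A (Python) =====
-- def _split_neg_num(number, start_index=0):
--     index_minus = number.find('-', start_index)
--     fixed = []
--
--     if index_minus > 0 and not number[index_minus-1].isalpha():
--         num1 = number[:index_minus]
--         num2 = number[index_minus:]
--         fixn1 = _split_neg_num(num1)
--         fixn2 = _split_neg_num(num2)
--
--         if fixn1 is None:
--             fixed.append(num1)
--         else:
--             for i in fixn1:
--                 fixed.append(i)
--
--         if fixn2 is None:
--             fixed.append(num2)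
--         else:
--             for i in fixn2:
--                 fixed.append(i)
--
--         return fixed
--
--     else:
--         if index_minus != -1:
--             return _split_neg_num(number, index_minus+1)
--         else:
--             return None
--
-- def _fix_negative_num(nums: list) -> list:
--     fixed_nums = []
--     for num in nums:
--         fixed_num = _split_neg_num(num)
--         if fixed_num is not None:
--             for fn in fixed_num:
--                 fixed_nums.append(fn)
--         else:
--             fixed_nums.append(num)
--
--     return fixed_nums
-- ===== SOURCE B (Python) =====
-- def _fix_negative_num(nums: list) -> list:
--     # One flat pass per string: cut before every '-' that is not at position 0
--     # and not preceded by a letter; strings without such a '-' are kept whole.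
--     fixed_nums = []
--     for s in nums:
--         start = 0
--         for i in range(1, len(s)):
--             if s[i] == '-' and not s[i-1].isalpha():
--                 fixed_nums.append(s[start:i])
--                 start = i
--         fixed_nums.append(s[start:])
--     return fixed_nums
-- ===== Notes on version B (the rewrite author's own statement) =====
-- stated objective: simpler
-- what changed: Replaces the recursive find/slice/re-scan splitter (helper returning None or a list, re-searching each sliced fragment) with a single flat left-to-right pass per string that emits a slice at every qualifying '-' position.
import Mathlib
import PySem

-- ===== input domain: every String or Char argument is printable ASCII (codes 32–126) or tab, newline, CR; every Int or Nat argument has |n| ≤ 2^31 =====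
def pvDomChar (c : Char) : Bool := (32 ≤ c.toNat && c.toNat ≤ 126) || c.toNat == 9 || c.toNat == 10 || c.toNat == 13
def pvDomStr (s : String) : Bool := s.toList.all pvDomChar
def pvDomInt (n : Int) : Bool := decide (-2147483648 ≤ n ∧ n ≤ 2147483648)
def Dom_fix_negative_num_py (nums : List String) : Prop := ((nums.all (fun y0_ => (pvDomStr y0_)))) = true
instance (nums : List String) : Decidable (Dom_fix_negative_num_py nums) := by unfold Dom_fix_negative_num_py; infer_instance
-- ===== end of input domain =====

-- B replaces A's recursive find/slice/re-scan splitter (None-or-list helper) by a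
-- single flat left-to-right pass per string collecting slices at qualifying '-'
-- positions.

-- ===== PORT A =====

-- literal port of the helper _split_neg_num.  `fuel` is a pure totality guard (the
-- callers pass enough for every input; see splitNegNum_none / splitNegNum_some below);
-- the start_index A passes is always a natural number (0 or index_minus+1 with
-- index_minus ≥ 0), so it is typed Nat here.
def splitNegNum (fuel : Nat) (number : List Char) (start_index : Nat) : Option (List (List Char)) :=
  match fuel with
  | 0 => none
  | fuel + 1 =>
    let index_minus := PySem.Chars.findFrom number ['-'] (start_index : Int) none
    if 0 < index_minus ∧ ¬ (PySem.Chars.isalpha (PySem.List.pyGetD number (index_minus - 1) ' ') = true) then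
      let num1 := PySem.List.slice number none (some index_minus)
      let num2 := PySem.List.slice number (some index_minus) none
      let fixn1 := splitNegNum fuel num1 0
      let fixn2 := splitNegNum fuel num2 0
      some ((match fixn1 with
             | none => [num1]
             | some l => l) ++
            (match fixn2 with
             | none => [num2]
             | some l => l))
    else
      if index_minus ≠ -1 then
        splitNegNum fuel number (index_minus.toNat + 1)
      else
        none

def fix_negative_num_py (nums : List String) : List String :=
  nums.foldl (fun fixed_nums num =>
    match splitNegNum (3 * num.toList.length + 2) num.toList 0 with
    | some fixed_num => fixed_nums ++ fixed_num.map String.ofList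
    | none => fixed_nums ++ [num]) []

-- ===== PORT B =====

-- one step of B's inner loop body (i ranges over range(1, len(s)))
def fixStep (s : List Char) (st : Int × List (List Char)) (i : Int) : Int × List (List Char) :=
  if PySem.List.pyGetD s i ' ' = '-' ∧ ¬ (PySem.Chars.isalpha (PySem.List.pyGetD s (i - 1) ' ') = true) then
    (i, st.2 ++ [PySem.List.slice s (some st.1) (some i)])
  else st

-- B's per-string work: the inner loop plus the final append of s[start:]
def fixOne (s : List Char) : List (List Char) :=
  let r := (PySem.List.pyRange 1 (PySem.List.len s) 1).foldl (fixStep s) (0, [])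
  r.2 ++ [PySem.List.slice s (some r.1) none]

def fix_negative_num_py_alt (nums : List String) : List String :=
  nums.foldl (fun fixed_nums num => fixed_nums ++ (fixOne num.toList).map String.ofList) []

-- ===== PRECONDITION & SPEC =====
def Spec_fix_negative_num_py (nums : List String) (out : List String) : Prop := out = fix_negative_num_py_alt nums
instance (nums : List String) (out : List String) : Decidable (Spec_fix_negative_num_py nums out) := by unfold Spec_fix_negative_num_py; infer_instance

-- ===== CLAIM (what is proved, stated in full; the proofs are below) =====
def Claim_equal_fix_negative_num_py : Prop := ∀ (nums : List String), Dom_fix_negative_num_py nums → Spec_fix_negative_num_py nums (fix_negative_num_py nums)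

-- ===== LEMMAS AND PROOFS =====

-- qualifying cut position: s[i] == '-' and s[i-1] is not a letter (used only with i ≥ 1)
def qb (s : List Char) (i : Nat) : Bool :=
  (s.getD i ' ' == '-') && !(PySem.Chars.isalpha (s.getD (i - 1) ' '))

theorem qb_false_of_not_minus {s : List Char} {i : Nat} (h : s.getD i ' ' ≠ '-') :
    qb s i = false := by
  simp [qb]; intro hc; exact absurd hc h

theorem qb_false_of_ge_length {s : List Char} {i : Nat} (h : s.length ≤ i) :
    qb s i = false := by
  apply qb_false_of_not_minus
  rw [List.getD_eq_default _ _ h]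
  decide

theorem qb_lt_length {s : List Char} {i : Nat} (h : qb s i = true) : i < s.length := by
  by_contra hc
  rw [qb_false_of_ge_length (by omega)] at h
  exact absurd h (by decide)

theorem qb_minus {s : List Char} {i : Nat} (h : qb s i = true) : s.getD i ' ' = '-' := by
  simp [qb] at h
  exact h.1

theorem qb_eq_true_iff (s : List Char) (i : Nat) :
    qb s i = true ↔ (s.getD i ' ' = '-' ∧ ¬ (PySem.Chars.isalpha (s.getD (i - 1) ' ') = true)) := by
  simp [qb]

-- getD picks out '-' exactly where getElem? does (the default ' ' is not '-')
theorem getD_minus_iff (s : List Char) (j : Nat) :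
    s.getD j ' ' = '-' ↔ s[j]? = some '-' := by
  rw [List.getD_eq_getElem?_getD]
  cases h : s[j]? <;> simp

-- ['-'] is a prefix of s.drop j exactly when s[j] is '-'
theorem minus_prefix_drop_iff (s : List Char) (j : Nat) :
    (['-'] <+: s.drop j) ↔ s[j]? = some '-' := by
  rw [← List.head?_drop]
  cases hd : s.drop j with
  | nil => simp
  | cons a t =>
    simp only [List.cons_prefix_cons, List.head?_cons, Option.some.injEq]
    constructor
    · rintro ⟨h1, _⟩; exact h1.symm
    · intro h1; exact ⟨h1.symm, List.nil_prefix⟩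

-- normalisation of s.find('-', k) for a Nat start
theorem findFrom_nat_norm (s sub : List Char) (k : Nat) :
    PySem.Chars.findFrom s sub (k : Int) none =
      if (s.length : Int) < (k : Int) then -1
      else if PySem.Chars.find (s.drop k) sub = -1 then -1
      else (k : Int) + PySem.Chars.find (s.drop k) sub := by
  simp only [PySem.Chars.findFrom]
  have h0 : ¬ ((k : Int) < 0) := by omega
  simp [h0, List.take_length]

-- full case analysis of number.find('-', k) for a Nat start
theorem findFrom_minus_cases (s : List Char) (k : Nat) :
    (PySem.Chars.findFrom s ['-'] (k : Int) none = -1 ∧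
      ∀ j, k ≤ j → s.getD j ' ' ≠ '-') ∨
    (∃ j₀ : Nat, PySem.Chars.findFrom s ['-'] (k : Int) none = (j₀ : Int) ∧ k ≤ j₀ ∧ j₀ < s.length ∧
      s.getD j₀ ' ' = '-' ∧ ∀ j, k ≤ j → j < j₀ → s.getD j ' ' ≠ '-') := by
  rw [findFrom_nat_norm]
  by_cases hk : (s.length : Int) < (k : Int)
  · left
    refine ⟨by simp [hk], ?_⟩
    intro j hj hc
    rw [getD_minus_iff] at hc
    obtain ⟨hlt2, _⟩ := List.getElem?_eq_some_iff.mp hc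
    omega
  · simp only [hk, if_false]
    by_cases hf : PySem.Chars.find (s.drop k) ['-'] = -1
    · left
      refine ⟨by simp [hf], ?_⟩
      intro j hj hc
      rw [getD_minus_iff] at hc
      rw [PySem.Chars.find_eq_neg_one_iff] at hf
      apply hf
      have hpre : ['-'] <+: (s.drop k).drop (j - k) := by
        rw [List.drop_drop, show k + (j - k) = j by omega]
        exact (minus_prefix_drop_iff s j).mpr hc
      have hin := (PySem.Chars.exists_prefix_drop_iff_isIn (sub := ['-']) (s := s.drop k)).mp ⟨_, hpre⟩
      rwa [PySem.Chars.isIn_iff_infix] at hin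
    · right
      simp only [hf, if_false]
      have hge : 0 ≤ PySem.Chars.find (s.drop k) ['-'] := by
        have := PySem.Chars.neg_one_le_find (s.drop k) ['-']
        omega
      obtain ⟨hpre, hmin⟩ := PySem.Chars.find_spec (s := s.drop k) (sub := ['-']) hge
      have hlt : (PySem.Chars.find (s.drop k) ['-']).toNat < (s.drop k).length := by
        have hle := hpre.length_le
        rw [List.length_drop] at hle
        simp only [List.length_cons, List.length_nil] at hle
        omega
      rw [List.length_drop] at hlt
      refine ⟨k + (PySem.Chars.find (s.drop k) ['-']).toNat, by omega, by omega, ?_, ?_, ?_⟩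
      · omega
      · rw [getD_minus_iff, ← minus_prefix_drop_iff]
        rw [List.drop_drop] at hpre
        exact hpre
      · intro j hj hjlt hc
        rw [getD_minus_iff, ← minus_prefix_drop_iff] at hc
        have := hmin (j - k) (by omega)
        rw [List.drop_drop] at this
        have hjk : k + (j - k) = j := by omega
        rw [hjk] at this
        exact this hc

-- first qualifying cut at position ≥ m
def firstCut (s : List Char) (m : Nat) : Option Nat :=
  if m < s.length then (if qb s m then some m else firstCut s (m + 1)) else none
termination_by s.length - m

theorem firstCut_lt (s : List Char) (m : Nat) (h : m < s.length) :
    firstCut s m = if qb s m then some m else firstCut s (m + 1) := by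
  rw [firstCut]
  simp [h]

theorem firstCut_ge (s : List Char) (m : Nat) (h : s.length ≤ m) : firstCut s m = none := by
  rw [firstCut]
  simp [show ¬ m < s.length by omega]

theorem firstCut_some (s : List Char) (m c : Nat) (h : firstCut s m = some c) :
    m ≤ c ∧ c < s.length ∧ qb s c = true ∧ ∀ j, m ≤ j → j < c → qb s j = false := by
  fun_induction firstCut s m with
  | case1 m hm hq =>
    cases h
    exact ⟨le_refl _, hm, hq, fun j h1 h2 => by omega⟩
  | case2 m hm hq ih =>
    obtain ⟨h1, h2, h3, h4⟩ := ih h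
    refine ⟨by omega, h2, h3, ?_⟩
    intro j hj1 hj2
    rcases Nat.eq_or_lt_of_le hj1 with rfl | hlt
    · simpa using hq
    · exact h4 j (by omega) hj2
  | case3 m hm => cases h

theorem firstCut_eq_some_of (s : List Char) (m c : Nat) (hq : qb s c = true) (hm : m ≤ c)
    (hmin : ∀ j, m ≤ j → j < c → qb s j = false) : firstCut s m = some c := by
  have hc : c < s.length := qb_lt_length hq
  fun_induction firstCut s m with
  | case1 m hlt hqm =>
    rcases Nat.eq_or_lt_of_le hm with rfl | hlt2
    · rfl
    · rw [hmin m (le_refl _) hlt2] at hqm; cases hqm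
  | case2 m hlt hqm ih =>
    rcases Nat.eq_or_lt_of_le hm with rfl | hlt2
    · simp [hq] at hqm
    · exact ih (by omega) (fun j h1 h2 => hmin j (by omega) h2)
  | case3 m hge => omega

theorem firstCut_step (s : List Char) (m : Nat) (hq : qb s m = false) :
    firstCut s m = firstCut s (m + 1) := by
  by_cases hm : m < s.length
  · rw [firstCut]
    simp [hm, hq]
  · rw [firstCut_ge s m (by omega), firstCut_ge s (m+1) (by omega)]

theorem firstCut_eq_none_of (s : List Char) (m : Nat)
    (h : ∀ j, m ≤ j → qb s j = false) : firstCut s m = none := by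
  cases hfc : firstCut s m with
  | none => rfl
  | some c =>
    obtain ⟨h1, _, h3, _⟩ := firstCut_some s m c hfc
    rw [h c h1] at h3; cases h3

-- the split of s into pieces: current chunk starts at `start`, cuts searched from m on
def piecesAux (s : List Char) (start m : Nat) : List (List Char) :=
  match h : firstCut s m with
  | none => [s.drop start]
  | some c => (s.drop start).take (c - start) :: piecesAux s c (c + 1)
termination_by s.length - m
decreasing_by
  have := firstCut_some s m c h
  omega

theorem piecesAux_of_none {s : List Char} {m : Nat} (start : Nat) (h : firstCut s m = none) :
    piecesAux s start m = [s.drop start] := by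
  rw [piecesAux]
  split <;> simp_all

theorem piecesAux_of_some {s : List Char} {m c : Nat} (start : Nat) (h : firstCut s m = some c) :
    piecesAux s start m = (s.drop start).take (c - start) :: piecesAux s c (c + 1) := by
  rw [piecesAux]
  split <;> simp_all

theorem piecesAux_step (s : List Char) (start m : Nat) (hq : qb s m = false) :
    piecesAux s start m = piecesAux s start (m + 1) := by
  cases hfc : firstCut s (m + 1) with
  | none => rw [piecesAux_of_none start hfc, piecesAux_of_none start ((firstCut_step s m hq).trans hfc)]
  | some c => rw [piecesAux_of_some start hfc, piecesAux_of_some start ((firstCut_step s m hq).trans hfc)]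

-- ===== shift lemmas (dropping a prefix shifts cut positions) =====

theorem qb_drop (s : List Char) (i j : Nat) (hj : 1 ≤ j) :
    qb (s.drop i) j = qb s (i + j) := by
  have h1 : (s.drop i).getD j ' ' = s.getD (i + j) ' ' := by
    rw [List.getD_eq_getElem?_getD, List.getD_eq_getElem?_getD, List.getElem?_drop]
  have h2 : (s.drop i).getD (j - 1) ' ' = s.getD (i + j - 1) ' ' := by
    rw [List.getD_eq_getElem?_getD, List.getD_eq_getElem?_getD, List.getElem?_drop,
        show i + (j - 1) = i + j - 1 by omega]
  rw [qb, qb, h1, h2]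

theorem qb_take_eq (s : List Char) (i j : Nat) (h : j + 1 ≤ i) :
    qb (s.take i) j = qb s j := by
  have h1 : (s.take i).getD j ' ' = s.getD j ' ' := by
    rw [List.getD_eq_getElem?_getD, List.getD_eq_getElem?_getD, List.getElem?_take_of_lt (by omega)]
  have h2 : (s.take i).getD (j - 1) ' ' = s.getD (j - 1) ' ' := by
    rw [List.getD_eq_getElem?_getD, List.getD_eq_getElem?_getD, List.getElem?_take_of_lt (by omega)]
  rw [qb, qb, h1, h2]

theorem firstCut_drop (s : List Char) (i : Nat) :
    ∀ m, 1 ≤ m → firstCut (s.drop i) m = (firstCut s (i + m)).map (fun c => c - i) := by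
  intro m
  induction hn : s.length - (i + m) using Nat.strong_induction_on generalizing m with
  | _ n ih =>
    intro hm
    by_cases hlt : i + m < s.length
    · have hd : m < (s.drop i).length := by rw [List.length_drop]; omega
      rw [firstCut_lt (s.drop i) m hd, firstCut_lt s (i + m) hlt, qb_drop s i m hm]
      by_cases hq : qb s (i + m) = true
      · simp only [hq, if_true, Option.map_some]
        congr 1
        omega
      · rw [Bool.not_eq_true] at hq
        have := ih (s.length - (i + m + 1)) (by omega) (m + 1) (by omega) (by omega)
        simp [hq, this, Nat.add_assoc]
    · rw [firstCut_ge (s.drop i) m (by rw [List.length_drop]; omega),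
          firstCut_ge s (i + m) (by omega)]
      rfl

theorem piecesAux_drop (s : List Char) (i : Nat) :
    ∀ m start, i ≤ start → i + 1 ≤ m →
      piecesAux (s.drop i) (start - i) (m - i) = piecesAux s start m := by
  intro m
  induction hn : s.length - m using Nat.strong_induction_on generalizing m with
  | _ n ih =>
    intro start hstart hm
    have hfc := firstCut_drop s i (m - i) (by omega)
    rw [show i + (m - i) = m by omega] at hfc
    cases hsm : firstCut s m with
    | none =>
      rw [hsm] at hfc
      rw [piecesAux_of_none _ hfc, piecesAux_of_none _ hsm, List.drop_drop,
          show i + (start - i) = start by omega]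
    | some c =>
      rw [hsm] at hfc
      obtain ⟨hc1, hc2, _, _⟩ := firstCut_some s m c hsm
      rw [piecesAux_of_some _ hfc, piecesAux_of_some _ hsm, List.drop_drop,
          show i + (start - i) = start by omega,
          show c - i - (start - i) = c - start by omega]
      congr 1
      have := ih (s.length - (c + 1)) (by omega) (c + 1) (by omega) c (by omega) (by omega)
      rw [show c + 1 - i = c - i + 1 by omega] at this
      exact this

-- ===== A-side characterisation =====

-- the branch condition of _split_neg_num at a found minus position j₀ is qb (for j₀ ≥ 1)
theorem cond_iff_qb (s : List Char) (j₀ : Nat) (hminus : s.getD j₀ ' ' = '-') :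
    ((0 : Int) < (j₀ : Int) ∧
      ¬ (PySem.Chars.isalpha (PySem.List.pyGetD s ((j₀ : Int) - 1) ' ') = true)) ↔
    (1 ≤ j₀ ∧ qb s j₀ = true) := by
  constructor
  · rintro ⟨h1, h2⟩
    have hj : 1 ≤ j₀ := by omega
    refine ⟨hj, ?_⟩
    rw [qb_eq_true_iff]
    refine ⟨hminus, ?_⟩
    rwa [show ((j₀ : Int) - 1) = ((j₀ - 1 : Nat) : Int) by omega, PySem.List.pyGetD_natCast] at h2
  · rintro ⟨hj, hq⟩
    rw [qb_eq_true_iff] at hq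
    refine ⟨by omega, ?_⟩
    rw [show ((j₀ : Int) - 1) = ((j₀ - 1 : Nat) : Int) by omega, PySem.List.pyGetD_natCast]
    exact hq.2

-- L1: if no qualifying cut lies at or after k, _split_neg_num returns None
theorem splitNegNum_none :
    ∀ fuel (s : List Char) (k : Nat), s.length + 1 - k < fuel →
      (∀ j, k ≤ j → 1 ≤ j → qb s j = false) → splitNegNum fuel s k = none := by
  intro fuel
  induction fuel with
  | zero => intro s k hf hno; omega
  | succ fuel ih =>
    intro s k hf hno
    rw [splitNegNum]
    rcases findFrom_minus_cases s k with ⟨hff, _⟩ | ⟨j₀, hff, hk, hlen, hminus, _⟩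
    · simp [hff]
    · simp only [hff]
      have hcond : ¬ ((0 : Int) < (j₀ : Int) ∧
          ¬ (PySem.Chars.isalpha (PySem.List.pyGetD s ((j₀ : Int) - 1) ' ') = true)) := by
        rw [cond_iff_qb s j₀ hminus]
        rintro ⟨hj, hq⟩
        rw [hno j₀ hk hj] at hq
        cases hq
      rw [if_neg hcond, if_pos (by omega)]
      rw [Int.toNat_natCast]
      exact ih s (j₀ + 1) (by omega) (fun j h1 h2 => hno j (by omega) h2)

-- L2: with no qualifying cut before k and one somewhere, _split_neg_num k returns all pieces
theorem splitNegNum_some :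
    ∀ fuel (s : List Char) (k : Nat), 3 * s.length + 1 < fuel + 2 * k →
      (∀ j, 1 ≤ j → j < k → qb s j = false) →
      (∃ j, 1 ≤ j ∧ qb s j = true) →
      splitNegNum fuel s k = some (piecesAux s 0 1) := by
  intro fuel
  induction fuel with
  | zero =>
    intro s k hf hinv hex
    obtain ⟨jw, hjw1, hjw2⟩ := hex
    have hjwlen := qb_lt_length hjw2
    have : jw < k := by omega
    rw [hinv jw hjw1 this] at hjw2
    cases hjw2
  | succ fuel ih =>
    intro s k hf hinv hex
    obtain ⟨jw, hjw1, hjw2⟩ := hex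
    have hjwlen := qb_lt_length hjw2
    have hjwk : k ≤ jw := by
      by_contra hc
      rw [hinv jw hjw1 (by omega)] at hjw2
      cases hjw2
    rcases findFrom_minus_cases s k with ⟨hff, hnom⟩ | ⟨j₀, hff, hkj, hlen, hminus, hmin⟩
    · exact absurd (qb_minus hjw2) (hnom jw hjwk)
    · rw [splitNegNum]
      simp only [hff]
      -- no qualifying cut strictly before j₀
      have hbelow : ∀ j, 1 ≤ j → j < j₀ → qb s j = false := by
        intro j h1 h2
        by_cases hjk : j < k
        · exact hinv j h1 hjk
        · exact qb_false_of_not_minus (hmin j (by omega) h2)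
      by_cases hcond : ((0 : Int) < (j₀ : Int) ∧
          ¬ (PySem.Chars.isalpha (PySem.List.pyGetD s ((j₀ : Int) - 1) ' ') = true))
      · -- qualifying: split into s[:j₀] and s[j₀:]
        obtain ⟨hj₀1, hqj₀⟩ := (cond_iff_qb s j₀ hminus).mp hcond
        rw [if_pos hcond]
        have hnum1 : PySem.List.slice s none (some (j₀ : Int)) = s.take j₀ := by
          rw [PySem.List.slice_to s (show (0:Int) ≤ (j₀:Int) by omega), Int.toNat_natCast]
        have hnum2 : PySem.List.slice s (some (j₀ : Int)) = s.drop j₀ := by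
          rw [PySem.List.slice_from s (show (0:Int) ≤ (j₀:Int) by omega), Int.toNat_natCast]
        have hf1 : splitNegNum fuel (PySem.List.slice s none (some (j₀ : Int))) 0 = none := by
          rw [hnum1]
          apply splitNegNum_none fuel (s.take j₀) 0 (by rw [List.length_take]; omega)
          intro j _ hj1
          by_cases hjlt : j + 1 ≤ j₀
          · rw [qb_take_eq s j₀ j hjlt]
            exact hbelow j hj1 (by omega)
          · exact qb_false_of_ge_length (by rw [List.length_take]; omega)
        have hfc1 : firstCut s 1 = some j₀ :=
          firstCut_eq_some_of s 1 j₀ hqj₀ hj₀1 (fun j h1 h2 => hbelow j h1 h2)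
        rw [hf1]
        have htail : ∀ r, splitNegNum fuel (PySem.List.slice s (some (j₀ : Int))) 0 = r →
            (match r with
             | none => [PySem.List.slice s (some (j₀ : Int))]
             | some l => l) = piecesAux s j₀ (j₀ + 1) := by
          intro r hr
          by_cases hex2 : ∃ j, 1 ≤ j ∧ qb (s.drop j₀) j = true
          · have := ih (s.drop j₀) 0
              (by rw [List.length_drop]; omega) (fun j h1 h2 => absurd h2 (by omega)) hex2
            rw [hnum2, this] at hr
            rw [← hr]
            have := piecesAux_drop s j₀ (j₀ + 1) j₀ (le_refl _) (by omega)
            rw [show j₀ - j₀ = 0 by omega, show j₀ + 1 - j₀ = 1 by omega] at this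
            exact this
          · push Not at hex2
            have : splitNegNum fuel (s.drop j₀) 0 = none := by
              apply splitNegNum_none fuel (s.drop j₀) 0 (by rw [List.length_drop]; omega)
              intro j _ hj1
              simpa using hex2 j hj1
            rw [hnum2, this] at hr
            rw [← hr, hnum2]
            rw [piecesAux_of_none j₀ ?hnone]
            case hnone =>
              apply firstCut_eq_none_of
              intro j hj
              have := hex2 (j - j₀) (by omega)
              rw [qb_drop s j₀ (j - j₀) (by omega), show j₀ + (j - j₀) = j by omega] at this
              simpa using this
        rw [piecesAux_of_some 0 hfc1]
        simp only [List.drop_zero, Nat.sub_zero]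
        rw [← htail (splitNegNum fuel (PySem.List.slice s (some (j₀ : Int))) 0) rfl]
        rw [hnum1, List.singleton_append]
      · -- not qualifying: skip to j₀ + 1
        rw [if_neg hcond, if_pos (by omega), Int.toNat_natCast]
        have hqj₀ : j₀ = 0 ∨ qb s j₀ = false := by
          rcases Nat.eq_zero_or_pos j₀ with h0 | hpos
          · exact Or.inl h0
          · right
            by_contra hc
            rw [Bool.not_eq_false] at hc
            exact hcond ((cond_iff_qb s j₀ hminus).mpr ⟨by omega, hc⟩)
        have hinv' : ∀ j, 1 ≤ j → j < j₀ + 1 → qb s j = false := by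
          intro j h1 h2
          rcases Nat.lt_or_ge j j₀ with hlt | hge
          · exact hbelow j h1 hlt
          · have hj : j = j₀ := by omega
            subst hj
            rcases hqj₀ with h0 | hfalse
            · omega
            · exact hfalse
        exact ih s (j₀ + 1) (by omega) hinv' ⟨jw, hjw1, hjw2⟩

theorem main_per_string (s : List Char) :
    (match splitNegNum (3 * s.length + 2) s 0 with
     | none => [s]
     | some l => l) = piecesAux s 0 1 := by
  by_cases hex : ∃ j, 1 ≤ j ∧ qb s j = true
  · rw [splitNegNum_some (3 * s.length + 2) s 0 (by omega) (fun j h1 h2 => absurd h2 (by omega)) hex]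
  · push Not at hex
    have h1 : splitNegNum (3 * s.length + 2) s 0 = none := by
      apply splitNegNum_none (3 * s.length + 2) s 0 (by omega)
      intro j _ hj
      simpa using hex j hj
    rw [h1, piecesAux_of_none 0 (firstCut_eq_none_of s 1 (fun j hj => by simpa using hex j hj))]
    simp

-- ===== B-side characterisation =====

theorem bfold (s : List Char) :
    ∀ (m start : Nat) (acc : List (List Char)), 1 ≤ m → start ≤ m →
      (let r := (PySem.List.pyRange (m : Int) (s.length : Int)).foldl (fixStep s) ((start : Int), acc)
       r.2 ++ [PySem.List.slice s (some r.1)]) = acc ++ piecesAux s start m := by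
  intro m
  induction hn : s.length - m using Nat.strong_induction_on generalizing m with
  | _ n ih =>
    intro start acc hm hstart
    by_cases hlt : m < s.length
    · rw [PySem.List.pyRange_one_cons (by exact_mod_cast hlt)]
      simp only [List.foldl_cons]
      have hstep : fixStep s ((start : Int), acc) (m : Int) =
          (if qb s m then ((m : Int), acc ++ [PySem.List.slice s (some (start : Int)) (some (m : Int))])
           else ((start : Int), acc)) := by
        rw [fixStep]
        by_cases hq : qb s m = true
        · rw [if_pos ?c, if_pos hq]
          case c =>
            rw [qb_eq_true_iff] at hq
            refine ⟨by rw [PySem.List.pyGetD_natCast]; exact hq.1, ?_⟩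
            rw [show ((m : Int) - 1) = ((m - 1 : Nat) : Int) by omega, PySem.List.pyGetD_natCast]
            exact hq.2
        · rw [if_neg ?c, if_neg hq]
          case c =>
            rw [qb_eq_true_iff] at hq
            rintro ⟨h1, h2⟩
            apply hq
            refine ⟨by rwa [PySem.List.pyGetD_natCast] at h1, ?_⟩
            rwa [show ((m : Int) - 1) = ((m - 1 : Nat) : Int) by omega, PySem.List.pyGetD_natCast] at h2
      rw [hstep]
      by_cases hq : qb s m = true
      · rw [if_pos hq]
        have hcast : ((m : Int) + 1) = ((m + 1 : Nat) : Int) := by omega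
        rw [hcast]
        have := ih (s.length - (m + 1)) (by omega) (m + 1) (by omega) m
          (acc ++ [PySem.List.slice s (some (start : Int)) (some (m : Int))]) (by omega) (by omega)
        rw [this]
        rw [piecesAux_of_some start (firstCut_eq_some_of s m m hq (le_refl _) (fun j h1 h2 => absurd h2 (by omega)))]
        rw [PySem.List.slice_natCast]
        simp
      · rw [if_neg hq, Bool.not_eq_true] at *
        have hcast : ((m : Int) + 1) = ((m + 1 : Nat) : Int) := by omega
        rw [hcast]
        have := ih (s.length - (m + 1)) (by omega) (m + 1) (by omega) start acc (by omega) (by omega)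
        rw [this, piecesAux_step s start m hq]
    · have hnil : PySem.List.pyRange (m : Int) (s.length : Int) = [] := by
        have : ∀ x, x ∉ PySem.List.pyRange (m : Int) (s.length : Int) := by
          intro x hx
          rw [PySem.List.mem_pyRange_one] at hx
          omega
        exact List.eq_nil_iff_forall_not_mem.mpr this
      rw [hnil]
      simp only [List.foldl_nil]
      rw [PySem.List.slice_from s (show (0:Int) ≤ (start:Int) by omega), Int.toNat_natCast,
          piecesAux_of_none start (firstCut_ge s m (by omega))]

theorem fixOne_eq (s : List Char) : fixOne s = piecesAux s 0 1 := by
  unfold fixOne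
  have hlen : PySem.List.len s = (s.length : Int) := by simp [PySem.List.len_eq]
  have := bfold s 1 0 [] (le_refl _) (by omega)
  simp only at this
  rw [hlen]
  have h1 : ((1 : Nat) : Int) = (1 : Int) := by norm_num
  have h0 : ((0 : Nat) : Int) = (0 : Int) := by norm_num
  rw [h1, h0] at this
  rw [this]
  simp

-- per-string agreement, on strings
theorem per_string (num : String) :
    (match splitNegNum (3 * num.toList.length + 2) num.toList 0 with
     | some fixed_num => fixed_num.map String.ofList
     | none => [num]) = (fixOne num.toList).map String.ofList := by
  rw [fixOne_eq]
  have h := main_per_string num.toList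
  cases hs : splitNegNum (3 * num.toList.length + 2) num.toList 0 with
  | none =>
    rw [hs] at h
    rw [← h]
    simp [String.ofList_toList]
  | some l =>
    rw [hs] at h
    rw [← h]

-- ===== VERDICT (by name: the statement is the Claim_ definition above) =====
theorem fix_negative_num_py_spec : Claim_equal_fix_negative_num_py := by
  intro nums _
  unfold Spec_fix_negative_num_py fix_negative_num_py fix_negative_num_py_alt
  have hbody : (fun (fixed_nums : List String) (num : String) =>
      match splitNegNum (3 * num.toList.length + 2) num.toList 0 with
      | some fixed_num => fixed_nums ++ fixed_num.map String.ofList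
      | none => fixed_nums ++ [num]) =
      (fun fixed_nums num => fixed_nums ++ (fixOne num.toList).map String.ofList) := by
    funext fixed_nums num
    have h := per_string num
    cases hs : splitNegNum (3 * num.toList.length + 2) num.toList 0 with
    | none => rw [hs] at h; simp only [← h]
    | some l => rw [hs] at h; simp only [← h]
  rw [hbody]
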